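-- pv_equiv track=rewrite | github.com/Hlebuysh/SAT_probabilistic_DPLL | SAT_v0.1.0-master/DPLL.py | simplify_cnf
-- ===== SOURCE A (Python) =====
-- def simplify_cnf(clauses):
--     simplified_clauses = [clause for clause in clauses if
--                           not any(literal.lower() in clause for literal in clause if literal.isupper())]
--
--     unit_clauses = [clause[0] for clause in simplified_clauses if len(clause) == 1 and clause[0].islower()]
--     while unit_clauses:
--         unit_literal = unit_clauses[0]
--         simplified_clauses = [clause for clause in simplified_clauses if unit_literal not in clause]
--         simplified_clauses = [[literal for literal in clause if literal != unit_literal.upper()] for clause in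
--                               simplified_clauses]
--         unit_clauses = [clause[0] for clause in simplified_clauses if len(clause) == 1 and clause[0].islower()]
--
--     return simplified_clauses
-- ===== SOURCE B (Python) =====
-- def simplify_cnf(clauses):
--     # Round-based unit-propagation fixpoint: collect the set of propagated unit
--     # literals first, then build the result in one final pass over the clause list.
--     base = [clause for clause in clauses
--             if not any(lit.isupper() and lit.lower() in clause for lit in clause)]
--     units = set()
--     while True:
--         uppers = {u.upper() for u in units}
--         new = set()
--         for clause in base:
--             if any(lit in units for lit in clause):
--                 continue
--             reduced = [lit for lit in clause if lit not in uppers]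
--             if len(reduced) == 1 and reduced[0].islower() and reduced[0] not in units:
--                 new.add(reduced[0])
--         if not new:
--             break
--         units |= new
--     uppers = {u.upper() for u in units}
--     return [[lit for lit in clause if lit not in uppers]
--             for clause in base if not any(lit in units for lit in clause)]
-- ===== Notes on version B (the rewrite author's own statement) =====
-- stated objective: alternative
-- what changed: B computes the set of propagated unit literals as a round-based fixpoint over the tautology-free clause list (adding all units derivable in a round at once) and builds the output in one final filter/map pass, instead of A's rebuilding of the entire clause list after every single propagated unit; the proof shows the propagation order does not matter.
import Mathlib
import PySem

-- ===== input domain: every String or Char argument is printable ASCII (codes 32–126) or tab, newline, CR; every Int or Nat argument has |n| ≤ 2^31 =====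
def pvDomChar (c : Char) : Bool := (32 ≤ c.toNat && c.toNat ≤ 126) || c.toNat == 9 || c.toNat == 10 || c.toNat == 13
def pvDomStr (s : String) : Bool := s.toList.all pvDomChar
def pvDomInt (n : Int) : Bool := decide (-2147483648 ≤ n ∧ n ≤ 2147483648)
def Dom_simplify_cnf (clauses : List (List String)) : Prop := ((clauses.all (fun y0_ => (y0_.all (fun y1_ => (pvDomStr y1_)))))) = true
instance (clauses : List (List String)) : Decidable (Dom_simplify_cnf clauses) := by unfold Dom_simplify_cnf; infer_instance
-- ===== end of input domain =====

-- B replaces A's per-unit rescan-and-rebuild propagation by a round-based fixpoint that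
-- first collects the set of propagated unit literals and then builds the result in one pass.

-- hand port of Python str.islower(): at least one cased character and no uppercase one;
-- exact on the printable-ASCII domain, where the cased characters are exactly the letters
def pyStrIslower (s : String) : Bool :=
  (s.toList.any PySem.Chars.islower) && !(s.toList.any PySem.Chars.isupper)

-- hand port of Python str.isupper(), exact on the printable-ASCII domain (see pyStrIslower)
def pyStrIsupper (s : String) : Bool :=
  (s.toList.any PySem.Chars.isupper) && !(s.toList.any PySem.Chars.islower)

-- the tautology test both Pythons apply to each clause:
-- any(literal.isupper() and literal.lower() in clause for literal in clause)
def pyTaut (clause : List String) : Bool :=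
  clause.any (fun literal => pyStrIsupper literal && clause.contains (PySem.Str.lower literal))

-- ===== PORT A =====

-- [clause[0] for clause in cs if len(clause) == 1 and clause[0].islower()]
def unitsA (cs : List (List String)) : List String :=
  cs.filterMap (fun clause =>
    match clause with
    | [l] => if pyStrIslower l then some l else none
    | _ => none)

-- needed by loopA's termination argument (cited in decreasing_by)
lemma mem_unitsA {cs : List (List String)} {u : String} :
    u ∈ unitsA cs ↔ [u] ∈ cs ∧ pyStrIslower u = true := by
  simp only [unitsA, List.mem_filterMap]
  constructor
  · rintro ⟨c, hc, hfc⟩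
    match c with
    | [] => simp at hfc
    | [l] =>
      by_cases hl : pyStrIslower l = true
      · simp only [hl, if_true, Option.some.injEq] at hfc
        subst hfc; exact ⟨hc, hl⟩
      · simp [hl] at hfc
    | l1 :: l2 :: t => simp at hfc
  · rintro ⟨hmem, hl⟩
    exact ⟨[u], hmem, by simp [hl]⟩

-- the while-loop of A: recompute the unit list, propagate its first element
def loopA (cs : List (List String)) : List (List String) :=
  match h : unitsA cs with
  | [] => cs
  | u :: rest =>
      loopA ((cs.filter (fun clause => !clause.contains u)).map
        (fun clause => clause.filter (fun l => l != PySem.Str.upper u)))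
termination_by cs.length
decreasing_by
  have hu : [u] ∈ cs := by
    have hmem : u ∈ unitsA cs := by rw [h]; exact List.mem_cons_self ..
    exact (mem_unitsA.mp hmem).1
  have hlt : (List.filter (fun x : {c // c ∈ cs} => !x.val.contains u) cs.attach).length
      < cs.attach.length := by
    refine List.length_filter_lt_length_iff_exists.mpr ⟨⟨[u], hu⟩, List.mem_attach .., ?_⟩
    simp
  simp only [List.length_map]
  rw [← List.length_attach (l := cs)]
  exact hlt

def simplify_cnf (clauses : List (List String)) : List (List String) :=
  loopA (clauses.filter (fun clause => !pyTaut clause))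

-- ===== PORT B =====

-- body of the 'for clause in base' loop of one round of Source B
def roundStep (units uppers : PySem.Set String) (nw : PySem.Set String)
    (clause : List String) : PySem.Set String :=
  if clause.any (fun lit => PySem.Set.contains units lit) then nw
  else
    match clause.filter (fun lit => !PySem.Set.contains uppers lit) with
    | [r] => if pyStrIslower r && !PySem.Set.contains units r then PySem.Set.add nw r else nw
    | _ => nw

-- one round of Source B: the set 'new' of freshly derivable unit literals
def roundNew (base : List (List String)) (units : PySem.Set String) : PySem.Set String :=
  base.foldl (roundStep units (PySem.Set.ofList (units.map PySem.Str.upper))) PySem.Set.empty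

-- membership after one roundStep (used by loopB's termination and by the proofs below)
lemma mem_roundStep {units uppers acc : PySem.Set String} {c : List String} {x : String} :
    x ∈ roundStep units uppers acc c ↔
      x ∈ acc ∨ (c.any (fun lit => PySem.Set.contains units lit) = false ∧
        c.filter (fun lit => !PySem.Set.contains uppers lit) = [x] ∧
        pyStrIslower x = true ∧ x ∉ units) := by
  unfold roundStep
  cases hany : c.any (fun lit => PySem.Set.contains units lit) with
  | true =>
    simp only [if_true]
    constructor
    · exact Or.inl
    · rintro (hx | ⟨hf, -, -, -⟩)
      · exact hx
      · simp [hany] at hf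
  | false =>
    simp only [Bool.false_eq_true, if_false]
    rcases hfil : c.filter (fun lit => !PySem.Set.contains uppers lit) with _ | ⟨r, _ | ⟨r2, rs⟩⟩
    · simp
    · by_cases hcond : (pyStrIslower r && !PySem.Set.contains units r) = true
      · simp only [hcond, if_true, PySem.Set.mem_add]
        have hcond' : pyStrIslower r = true ∧ r ∉ units := by simpa using hcond
        obtain ⟨hrl, hrnu⟩ := hcond'
        constructor
        · rintro (hx | rfl)
          · exact Or.inl hx
          · exact Or.inr ⟨by simp [hany], rfl, hrl, hrnu⟩
        · rintro (hx | ⟨-, heq, -, -⟩)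
          · exact Or.inl hx
          · cases heq; exact Or.inr rfl
      · simp only [hcond, if_false]
        constructor
        · exact Or.inl
        · rintro (hx | ⟨-, heq, hxl, hxnu⟩)
          · exact hx
          · cases heq
            exfalso; apply hcond
            simpa [hxl] using hxnu
    · constructor
      · exact Or.inl
      · rintro (hx | ⟨-, heq, -, -⟩)
        · exact hx
        · simp at heq

lemma mem_foldl_roundStep {units uppers : PySem.Set String} (bs : List (List String)) :
    ∀ (acc : PySem.Set String) (x : String),
      x ∈ bs.foldl (roundStep units uppers) acc ↔
        x ∈ acc ∨ ∃ c ∈ bs, (c.any (fun lit => PySem.Set.contains units lit) = false ∧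
          c.filter (fun lit => !PySem.Set.contains uppers lit) = [x] ∧
          pyStrIslower x = true ∧ x ∉ units) := by
  induction bs with
  | nil => intro acc x; simp
  | cons c cs ih =>
      intro acc x
      simp only [List.foldl_cons, ih, mem_roundStep, List.mem_cons]
      constructor
      · rintro ((hx | hc) | ⟨c', hc', hcond⟩)
        · exact Or.inl hx
        · exact Or.inr ⟨c, Or.inl rfl, hc⟩
        · exact Or.inr ⟨c', Or.inr hc', hcond⟩
      · rintro (hx | ⟨c', (rfl | hc'), hcond⟩)
        · exact Or.inl (Or.inl hx)
        · exact Or.inl (Or.inr hcond)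
        · exact Or.inr ⟨c', hc', hcond⟩

-- weak facts used by loopB's termination (cited in decreasing_by)
lemma mem_roundNew_weak {base : List (List String)} {units : PySem.Set String} {x : String}
    (hx : x ∈ roundNew base units) : x ∈ base.flatten ∧ x ∉ units := by
  rcases (mem_foldl_roundStep base PySem.Set.empty x).mp hx with h | ⟨c, hc, -, hfil, -, hnu⟩
  · simp [PySem.Set.empty] at h
  · refine ⟨List.mem_flatten.mpr ⟨c, hc, ?_⟩, hnu⟩
    have hx' : x ∈ c.filter (fun lit => !PySem.Set.contains (PySem.Set.ofList (units.map PySem.Str.upper)) lit) := by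
      rw [hfil]; exact List.mem_cons_self ..
    exact (List.mem_filter.mp hx').1

-- the termination measure shrinks when a fresh literal enters the set (cited in decreasing_by)
lemma pv_measure_lt {xs U V : List String} (hUV : ∀ x ∈ U, x ∈ V) {r : String}
    (hr : r ∈ xs) (hrU : r ∉ U) (hrV : r ∈ V) :
    (xs.filter (fun l => !V.contains l)).length < (xs.filter (fun l => !U.contains l)).length := by
  have hq : xs.filter (fun l => !V.contains l)
      = (xs.filter (fun l => !U.contains l)).filter (fun l => !V.contains l) := by
    rw [List.filter_filter]
    apply List.filter_congr
    intro x hx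
    by_cases hxV : x ∈ V
    · simp [List.contains_iff_mem, hxV]
    · have hxU : x ∉ U := fun h => hxV (hUV _ h)
      simp [List.contains_iff_mem, hxV, hxU]
  rw [hq]
  apply List.length_filter_lt_length_iff_exists.mpr
  refine ⟨r, List.mem_filter.mpr ⟨hr, by simp [List.contains_iff_mem, hrU]⟩,
    by simp [List.contains_iff_mem, hrV]⟩

-- the while-loop of Source B: grow 'units' by one round of new units until none appear
def loopB (base : List (List String)) (units : PySem.Set String) : PySem.Set String :=
  match h : roundNew base units with
  | [] => units
  | r :: rs => loopB base (PySem.Set.union units (r :: rs))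
termination_by ((PySem.List.dedup base.flatten).filter (fun l => !units.contains l)).length
decreasing_by
  have hr : r ∈ roundNew base units := by rw [h]; exact List.mem_cons_self ..
  obtain ⟨hrb, hru⟩ := mem_roundNew_weak hr
  apply pv_measure_lt (r := r)
  · intro x hx
    exact (PySem.Set.mem_union ..).mpr (Or.inl hx)
  · exact (PySem.List.mem_dedup ..).mpr hrb
  · exact hru
  · exact (PySem.Set.mem_union ..).mpr (Or.inr (List.mem_cons_self ..))

def simplify_cnf_alt (clauses : List (List String)) : List (List String) :=
  let base := clauses.filter (fun clause => !pyTaut clause)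
  let units := loopB base PySem.Set.empty
  let uppers : PySem.Set String := PySem.Set.ofList (units.map PySem.Str.upper)
  (base.filter (fun clause => !clause.any (fun lit => PySem.Set.contains units lit))).map
    (fun clause => clause.filter (fun lit => !PySem.Set.contains uppers lit))

-- ===== PRECONDITION & SPEC =====
def Spec_simplify_cnf (clauses : List (List String)) (out : List (List String)) : Prop := out = simplify_cnf_alt clauses
instance (clauses : List (List String)) (out : List (List String)) : Decidable (Spec_simplify_cnf clauses out) := by unfold Spec_simplify_cnf; infer_instance

-- ===== CLAIM (what is proved, stated in full; the proofs are below) =====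
def Claim_equal_simplify_cnf : Prop := ∀ (clauses : List (List String)), Dom_simplify_cnf clauses → Spec_simplify_cnf clauses (simplify_cnf clauses)

-- ===== LEMMAS AND PROOFS =====

lemma pv_bool_ext {a b : Bool} (h : a = true ↔ b = true) : a = b := by
  cases a <;> cases b <;> simp_all

-- clause still alive after propagating the unit literals U
def aliveP (U : List String) (c : List String) : Bool :=
  !c.any (fun l => PySem.Set.contains U l)

-- clause with the uppercase (complemented) images of the units U removed
def reduceP (U : List String) (c : List String) : List String :=
  c.filter (fun l => !(U.map PySem.Str.upper).contains l)

-- the clause list obtained by propagating the units U through 'base'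
def SP (base : List (List String)) (U : List String) : List (List String) :=
  (base.filter (aliveP U)).map (reduceP U)

-- l is a unit literal derivable in one step from the state SP base U
def isNU (base : List (List String)) (U : List String) (l : String) : Prop :=
  ∃ c ∈ base, aliveP U c = true ∧ reduceP U c = [l] ∧ pyStrIslower l = true

def LowerL (U : List String) : Prop := ∀ l ∈ U, pyStrIslower l = true

-- ---- character-level facts ----

lemma pv_isupper_upperChar {c : Char} (h : PySem.Chars.islower c = true) :
    PySem.Chars.isupper (PySem.Chars.upperChar c) = true := by
  have h' := h
  simp only [PySem.Chars.islower, Bool.and_eq_true, decide_eq_true_eq] at h'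
  obtain ⟨h1, h2⟩ := h'
  rw [Char.le_def] at h1 h2
  have n1 : (97 : Nat) ≤ c.val.toNat := by simpa using UInt32.le_iff_toNat_le.mp h1
  have n2 : c.val.toNat ≤ 122 := by simpa using UInt32.le_iff_toNat_le.mp h2
  have hcn : c.toNat = c.val.toNat := rfl
  have hval : Nat.isValidChar (c.toNat - 32) := Or.inl (by omega)
  have htn : (Char.ofNat (c.toNat - 32)).toNat = c.toNat - 32 := by
    rw [Char.toNat_ofNat, if_pos hval]
  unfold PySem.Chars.upperChar
  rw [if_pos h]
  simp only [PySem.Chars.isupper, Bool.and_eq_true, decide_eq_true_eq]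
  have hvtn : (Char.ofNat (c.toNat - 32)).val.toNat = (Char.ofNat (c.toNat - 32)).toNat := rfl
  constructor
  · rw [Char.le_def]
    apply UInt32.le_iff_toNat_le.mpr
    have ha : ('A' : Char).val.toNat = 65 := rfl
    rw [ha, hvtn, htn]; omega
  · rw [Char.le_def]
    apply UInt32.le_iff_toNat_le.mpr
    have hz : ('Z' : Char).val.toNat = 90 := rfl
    rw [hz, hvtn, htn]; omega

lemma pv_islower_upper_false {u : String} (hu : pyStrIslower u = true) :
    pyStrIslower (PySem.Str.upper u) = false := by
  simp only [pyStrIslower, Bool.and_eq_true, Bool.not_eq_true'] at hu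
  obtain ⟨hlow, -⟩ := hu
  rcases List.any_eq_true.mp hlow with ⟨c, hc, hcl⟩
  have hup : (PySem.Str.upper u).toList = u.toList.map PySem.Chars.upperChar := by
    rw [PySem.Str.toList_upper]; rfl
  have hany : (PySem.Str.upper u).toList.any PySem.Chars.isupper = true := by
    rw [hup]
    exact List.any_eq_true.mpr ⟨PySem.Chars.upperChar c, List.mem_map_of_mem hc,
      pv_isupper_upperChar hcl⟩
  unfold pyStrIslower
  rw [hany]
  simp

lemma pv_ne_upper {l u : String} (hl : pyStrIslower l = true) (hu : pyStrIslower u = true) :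
    l ≠ PySem.Str.upper u := by
  intro he
  rw [he, pv_islower_upper_false hu] at hl
  exact Bool.noConfusion hl

lemma pv_not_mem_uppers {l : String} {U : List String} (hl : pyStrIslower l = true)
    (hU : LowerL U) : l ∉ U.map PySem.Str.upper := by
  intro hmem
  rcases List.mem_map.mp hmem with ⟨u, huU, hequ⟩
  exact pv_ne_upper hl (hU u huU) hequ.symm

-- ---- membership bridges ----

lemma pv_contains_congr {xs ys : List String} (h : ∀ a, a ∈ xs ↔ a ∈ ys) (x : String) :
    xs.contains x = ys.contains x := by
  apply pv_bool_ext
  rw [List.contains_iff_mem, List.contains_iff_mem]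
  exact h x

lemma pv_contains_ofList (xs : List String) (x : String) :
    PySem.Set.contains (PySem.Set.ofList xs) x = xs.contains x := by
  rw [PySem.Set.contains_eq_listContains]
  exact pv_contains_congr (fun a => PySem.Set.mem_ofList xs a) x

lemma pv_alive_iff {U : List String} {c : List String} :
    aliveP U c = true ↔ ∀ x ∈ c, x ∉ U := by
  simp [aliveP, List.any_eq_true, PySem.Set.contains_eq_listContains, List.contains_iff_mem]

lemma pv_alive_false {U : List String} {c : List String} :
    aliveP U c = false ↔ ∃ x ∈ c, x ∈ U := by
  simp [aliveP, List.any_eq_true, PySem.Set.contains_eq_listContains, List.contains_iff_mem]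

lemma aliveP_congr {U V : List String} (h : ∀ a, a ∈ U ↔ a ∈ V) (c : List String) :
    aliveP U c = aliveP V c := by
  apply pv_bool_ext
  rw [pv_alive_iff, pv_alive_iff]
  exact ⟨fun hf x hx hxv => hf x hx ((h x).mpr hxv), fun hf x hx hxu => hf x hx ((h x).mp hxu)⟩

lemma reduceP_congr {U V : List String} (h : ∀ a, a ∈ U ↔ a ∈ V) (c : List String) :
    reduceP U c = reduceP V c := by
  unfold reduceP
  apply List.filter_congr
  intro x _
  congr 1
  apply pv_contains_congr
  intro a
  simp only [List.mem_map]
  exact ⟨fun ⟨u, hu, he⟩ => ⟨u, (h u).mp hu, he⟩, fun ⟨u, hu, he⟩ => ⟨u, (h u).mpr hu, he⟩⟩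

lemma SP_congr {base : List (List String)} {U V : List String} (h : ∀ a, a ∈ U ↔ a ∈ V) :
    SP base U = SP base V := by
  unfold SP
  rw [List.filter_congr (fun c _ => aliveP_congr h c)]
  exact List.map_congr_left (fun c _ => reduceP_congr h c)

lemma pv_SP_nil (base : List (List String)) : SP base [] = base := by
  unfold SP aliveP reduceP
  simp [PySem.Set.contains_eq_listContains]

-- ---- facts about reduced clauses ----

lemma pv_reduce_mem_of_reduced {U : List String} {c : List String} {l : String}
    (hred : reduceP U c = [l]) : ∀ x ∈ c, x = l ∨ x ∈ U.map PySem.Str.upper := by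
  intro x hx
  by_cases hxu : x ∈ U.map PySem.Str.upper
  · exact Or.inr hxu
  · left
    have hmem : x ∈ reduceP U c :=
      List.mem_filter.mpr ⟨hx, by simp [List.contains_iff_mem, hxu]⟩
    rw [hred] at hmem
    simpa using hmem

lemma pv_mem_reduce_iff {U : List String} (hU : LowerL U) {u : String}
    (hu : pyStrIslower u = true) (c : List String) :
    u ∈ reduceP U c ↔ u ∈ c := by
  unfold reduceP
  rw [List.mem_filter]
  constructor
  · exact fun h => h.1
  · intro h
    exact ⟨h, by simp [List.contains_iff_mem, pv_not_mem_uppers hu hU]⟩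

-- ---- the one-step propagation of A, expressed on SP ----

lemma pv_step {base : List (List String)} {U : List String} {u : String}
    (hU : LowerL U) (hu : pyStrIslower u = true) :
    ((SP base U).filter (fun clause => !clause.contains u)).map
      (fun clause => clause.filter (fun l => l != PySem.Str.upper u))
      = SP base (u :: U) := by
  unfold SP
  rw [List.filter_map, List.map_map, List.filter_filter]
  have hfil : ∀ c ∈ base,
      (((fun clause => !clause.contains u) ∘ reduceP U) c && aliveP U c) = aliveP (u :: U) c := by
    intro c _
    have h1 : (reduceP U c).contains u = c.contains u := by
      apply pv_bool_ext
      rw [List.contains_iff_mem, List.contains_iff_mem]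
      exact pv_mem_reduce_iff hU hu c
    show ((!(reduceP U c).contains u) && aliveP U c) = aliveP (u :: U) c
    rw [h1]
    apply pv_bool_ext
    simp only [Bool.and_eq_true, Bool.not_eq_true', pv_alive_iff]
    constructor
    · rintro ⟨hcu, hal⟩ x hx hxm
      rcases List.mem_cons.mp hxm with rfl | hxm
      · rw [(List.contains_iff_mem).mpr hx] at hcu; exact Bool.noConfusion hcu
      · exact hal x hx hxm
    · intro hf
      constructor
      · cases hcu : c.contains u with
        | false => rfl
        | true => exact absurd (List.mem_cons_self ..) (hf u (List.contains_iff_mem.mp hcu))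
      · exact fun x hx hxm => hf x hx (List.mem_cons_of_mem _ hxm)
  rw [List.filter_congr hfil]
  apply List.map_congr_left
  intro c _
  show (reduceP U c).filter (fun l => l != PySem.Str.upper u) = reduceP (u :: U) c
  unfold reduceP
  rw [List.filter_filter]
  apply List.filter_congr
  intro x _
  show ((x != PySem.Str.upper u) && !(U.map PySem.Str.upper).contains x)
      = !((u :: U).map PySem.Str.upper).contains x
  rw [List.map_cons, List.contains_cons, Bool.not_or]
  rfl

-- ---- bridges between the ports and SP / isNU ----

lemma pv_mem_SP {base : List (List String)} {U : List String} {c' : List String} :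
    c' ∈ SP base U ↔ ∃ c ∈ base, aliveP U c = true ∧ reduceP U c = c' := by
  unfold SP
  simp only [List.mem_map, List.mem_filter]
  constructor
  · rintro ⟨c, ⟨hc, ha⟩, rfl⟩; exact ⟨c, hc, ha, rfl⟩
  · rintro ⟨c, hc, ha, rfl⟩; exact ⟨c, ⟨hc, ha⟩, rfl⟩

lemma pv_unitsA_isNU {base : List (List String)} {U : List String} {u : String}
    (h : u ∈ unitsA (SP base U)) : isNU base U u := by
  rcases mem_unitsA.mp h with ⟨hmem, hl⟩
  rcases pv_mem_SP.mp hmem with ⟨c, hc, ha, hr⟩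
  exact ⟨c, hc, ha, hr, hl⟩

lemma pv_unitsA_nil {base : List (List String)} {U : List String}
    (h : unitsA (SP base U) = []) : ∀ l, ¬ isNU base U l := by
  rintro l ⟨c, hc, ha, hr, hl⟩
  have hmem : l ∈ unitsA (SP base U) := mem_unitsA.mpr ⟨pv_mem_SP.mpr ⟨c, hc, ha, hr⟩, hl⟩
  rw [h] at hmem
  exact absurd hmem (List.not_mem_nil)

lemma pv_mem_roundNew_iff {base : List (List String)} {units : PySem.Set String} {x : String} :
    x ∈ roundNew base units ↔ isNU base units x ∧ x ∉ units := by
  unfold roundNew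
  rw [mem_foldl_roundStep]
  have hred : ∀ c : List String,
      c.filter (fun lit => !PySem.Set.contains (PySem.Set.ofList (units.map PySem.Str.upper)) lit)
        = reduceP units c := by
    intro c
    apply List.filter_congr
    intro y _
    rw [pv_contains_ofList]
  constructor
  · rintro (h | ⟨c, hc, hany, hfil, hxl, hxu⟩)
    · exact absurd h (by simp [PySem.Set.empty])
    · refine ⟨⟨c, hc, ?_, ?_, hxl⟩, hxu⟩
      · rw [pv_alive_iff]
        intro y hy hyu
        have hta : c.any (fun lit => PySem.Set.contains units lit) = true :=
          List.any_eq_true.mpr ⟨y, hy, (PySem.Set.contains_iff ..).mpr hyu⟩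
        rw [hany] at hta
        exact Bool.noConfusion hta
      · rw [← hred c]; exact hfil
  · rintro ⟨⟨c, hc, ha, hr, hxl⟩, hxu⟩
    refine Or.inr ⟨c, hc, ?_, ?_, hxl, hxu⟩
    · cases hca : c.any (fun lit => PySem.Set.contains units lit) with
      | false => rfl
      | true =>
        exfalso
        obtain ⟨y, hy, hyc⟩ := List.any_eq_true.mp hca
        exact (pv_alive_iff.mp ha) y hy ((PySem.Set.contains_iff ..).mp hyc)
    · rw [hred c]; exact hr

-- ---- the mono/confluence lemma: derivable units stay derivable under a larger unit set ----

lemma pv_mono {base : List (List String)} {U V : List String} (hV : LowerL V)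
    (hUV : ∀ x ∈ U, x ∈ V) {l : String} (h : isNU base U l) : l ∈ V ∨ isNU base V l := by
  obtain ⟨c, hc, ha, hr, hl⟩ := h
  cases hav : aliveP V c with
  | false =>
    left
    obtain ⟨x, hxc, hxV⟩ := pv_alive_false.mp hav
    rcases pv_reduce_mem_of_reduced hr x hxc with rfl | hxu
    · exact hxV
    · exfalso
      rcases List.mem_map.mp hxu with ⟨u', hu'U, rfl⟩
      exact pv_ne_upper (hV _ hxV) (hV _ (hUV _ hu'U)) rfl
  | true =>
    right
    refine ⟨c, hc, hav, ?_, hl⟩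
    have hVU : reduceP V c = (reduceP U c).filter (fun x => !(V.map PySem.Str.upper).contains x) := by
      unfold reduceP
      rw [List.filter_filter]
      apply List.filter_congr
      intro x _
      cases hxV : (V.map PySem.Str.upper).contains x with
      | false =>
        have hxU : (U.map PySem.Str.upper).contains x = false := by
          cases hxU : (U.map PySem.Str.upper).contains x with
          | false => rfl
          | true =>
            exfalso
            rcases List.mem_map.mp (List.contains_iff_mem.mp hxU) with ⟨u', hu', rfl⟩
            have hmem : PySem.Str.upper u' ∈ V.map PySem.Str.upper :=
              List.mem_map_of_mem (hUV _ hu')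
            rw [List.contains_iff_mem.mpr hmem] at hxV
            exact Bool.noConfusion hxV
        rw [hxU]
        rfl
      | true => rfl
    rw [hVU, hr]
    have hql : (!(V.map PySem.Str.upper).contains l) = true := by
      cases hq : (V.map PySem.Str.upper).contains l with
      | false => rfl
      | true => exact absurd (List.contains_iff_mem.mp hq) (pv_not_mem_uppers hl hV)
    simp only [List.filter_cons, List.filter_nil, hql, if_true]

-- ---- equation lemmas for the two loops ----

lemma loopA_eq_nil {cs : List (List String)} (h : unitsA cs = []) : loopA cs = cs := by
  conv_lhs => rw [loopA.eq_def]
  split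
  · rfl
  · next u rest heq => rw [h] at heq; exact absurd heq (by simp)

lemma loopA_eq_cons {cs : List (List String)} {u : String} {rest : List String}
    (h : unitsA cs = u :: rest) :
    loopA cs = loopA ((cs.filter (fun clause => !clause.contains u)).map
      (fun clause => clause.filter (fun l => l != PySem.Str.upper u))) := by
  conv_lhs => rw [loopA.eq_def]
  split
  · next heq => rw [h] at heq; exact absurd heq (by simp)
  · next u' rest' heq =>
      rw [h] at heq
      injection heq with h1 h2
      subst h1; rfl

lemma loopB_eq_nil {base : List (List String)} {units : PySem.Set String}
    (h : roundNew base units = []) : loopB base units = units := by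
  conv_lhs => rw [loopB.eq_def]
  split
  · rfl
  · next r rs heq => rw [h] at heq; exact absurd heq (by simp)

lemma loopB_eq_cons {base : List (List String)} {units : PySem.Set String} {r : String}
    {rs : List String} (h : roundNew base units = r :: rs) :
    loopB base units = loopB base (PySem.Set.union units (r :: rs)) := by
  conv_lhs => rw [loopB.eq_def]
  split
  · next heq => rw [h] at heq; exact absurd heq (by simp)
  · next r' rs' heq =>
      rw [h] at heq
      injection heq with h1 h2
      subst h1; subst h2; rfl

-- ---- properties of loopB (by strong induction on its termination measure) ----

lemma pv_loopB_subset (base : List (List String)) {V : List String} (hV : LowerL V)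
    (hcl : ∀ l, isNU base V l → l ∈ V) :
    ∀ (n : Nat) (units : PySem.Set String),
      ((PySem.List.dedup base.flatten).filter (fun l => !units.contains l)).length ≤ n →
      (∀ x ∈ units, x ∈ V) → ∀ x ∈ loopB base units, x ∈ V := by
  intro n
  induction n using Nat.strong_induction_on with
  | _ n ih =>
    intro units hn hsub x hx
    rcases h : roundNew base units with _ | ⟨r, rs⟩
    · rw [loopB_eq_nil h] at hx
      exact hsub x hx
    · have hsub' : ∀ y ∈ PySem.Set.union units (r :: rs), y ∈ V := by
        intro y hy
        rcases (PySem.Set.mem_union ..).mp hy with hy | hy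
        · exact hsub y hy
        · have hyr : y ∈ roundNew base units := by rw [h]; exact hy
          have hNU := (pv_mem_roundNew_iff.mp hyr).1
          rcases pv_mono hV hsub hNU with hyV | hyV
          · exact hyV
          · exact hcl y hyV
      have hr : r ∈ roundNew base units := by rw [h]; exact List.mem_cons_self ..
      obtain ⟨hrb, hru⟩ := mem_roundNew_weak hr
      have hlt : ((PySem.List.dedup base.flatten).filter
            (fun l => !(PySem.Set.union units (r :: rs)).contains l)).length
          < ((PySem.List.dedup base.flatten).filter (fun l => !units.contains l)).length := by
        apply pv_measure_lt (r := r)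
        · intro y hy; exact (PySem.Set.mem_union ..).mpr (Or.inl hy)
        · exact (PySem.List.mem_dedup ..).mpr hrb
        · exact hru
        · exact (PySem.Set.mem_union ..).mpr (Or.inr (List.mem_cons_self ..))
      rw [loopB_eq_cons h] at hx
      exact ih _ (lt_of_lt_of_le hlt hn) _ le_rfl hsub' x hx

lemma pv_loopB_props (base : List (List String)) :
    ∀ (n : Nat) (units : PySem.Set String),
      ((PySem.List.dedup base.flatten).filter (fun l => !units.contains l)).length ≤ n →
      LowerL units →
      (∀ x ∈ units, x ∈ loopB base units) ∧ LowerL (loopB base units) ∧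
        (∀ l, isNU base (loopB base units) l → l ∈ loopB base units) := by
  intro n
  induction n using Nat.strong_induction_on with
  | _ n ih =>
    intro units hn hlow
    rcases h : roundNew base units with _ | ⟨r, rs⟩
    · rw [loopB_eq_nil h]
      refine ⟨fun x hx => hx, hlow, ?_⟩
      intro l hl
      by_cases hlu : l ∈ units
      · exact hlu
      · exfalso
        have : l ∈ roundNew base units := pv_mem_roundNew_iff.mpr ⟨hl, hlu⟩
        rw [h] at this
        exact absurd this (List.not_mem_nil)
    · have hlow' : LowerL (PySem.Set.union units (r :: rs)) := by
        intro y hy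
        rcases (PySem.Set.mem_union ..).mp hy with hy | hy
        · exact hlow y hy
        · have hyr : y ∈ roundNew base units := by rw [h]; exact hy
          obtain ⟨⟨c, -, -, -, hyl⟩, -⟩ := pv_mem_roundNew_iff.mp hyr
          exact hyl
      have hr : r ∈ roundNew base units := by rw [h]; exact List.mem_cons_self ..
      obtain ⟨hrb, hru⟩ := mem_roundNew_weak hr
      have hlt : ((PySem.List.dedup base.flatten).filter
            (fun l => !(PySem.Set.union units (r :: rs)).contains l)).length
          < ((PySem.List.dedup base.flatten).filter (fun l => !units.contains l)).length := by
        apply pv_measure_lt (r := r)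
        · intro y hy; exact (PySem.Set.mem_union ..).mpr (Or.inl hy)
        · exact (PySem.List.mem_dedup ..).mpr hrb
        · exact hru
        · exact (PySem.Set.mem_union ..).mpr (Or.inr (List.mem_cons_self ..))
      obtain ⟨hsup, hlw, hcl⟩ := ih _ (lt_of_lt_of_le hlt hn) _ le_rfl hlow'
      rw [loopB_eq_cons h]
      refine ⟨?_, hlw, hcl⟩
      intro x hx
      exact hsup x ((PySem.Set.mem_union ..).mpr (Or.inl hx))

-- ---- the main lemma: A's loop, started anywhere on a sound chain, lands on B's fixpoint ----

lemma pv_loopA_main (base : List (List String)) : ∀ (n : Nat) (U : List String),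
    (SP base U).length ≤ n → LowerL U → (∀ x ∈ U, x ∈ loopB base PySem.Set.empty) →
    loopA (SP base U) = SP base (loopB base PySem.Set.empty) := by
  intro n
  induction n using Nat.strong_induction_on with
  | _ n ih =>
    intro U hn hUlow hUW
    obtain ⟨-, hWlow, hWcl⟩ :=
      pv_loopB_props base _ PySem.Set.empty le_rfl (fun l hl => absurd hl (List.not_mem_nil))
    rcases hA : unitsA (SP base U) with _ | ⟨u, rest⟩
    · rw [loopA_eq_nil hA]
      have hWU : ∀ x ∈ loopB base PySem.Set.empty, x ∈ U :=
        pv_loopB_subset base hUlow (fun l hl => absurd hl (pv_unitsA_nil hA l)) _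
          PySem.Set.empty le_rfl (fun x hx => absurd hx (List.not_mem_nil))
      exact SP_congr (fun a => ⟨fun ha => hUW a ha, fun ha => hWU a ha⟩)
    · have humem : u ∈ unitsA (SP base U) := by rw [hA]; exact List.mem_cons_self ..
      have hNU : isNU base U u := pv_unitsA_isNU humem
      have hul : pyStrIslower u = true := (mem_unitsA.mp humem).2
      have huW : u ∈ loopB base PySem.Set.empty := by
        rcases pv_mono hWlow hUW hNU with h | h
        · exact h
        · exact hWcl u h
      have hstep := pv_step (base := base) hUlow hul
      have hulist : [u] ∈ SP base U := (mem_unitsA.mp humem).1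
      have hlt : (SP base (u :: U)).length < (SP base U).length := by
        rw [← hstep]
        simp only [List.length_map]
        exact List.length_filter_lt_length_iff_exists.mpr ⟨[u], hulist, by simp⟩
      rw [loopA_eq_cons hA, hstep]
      refine ih _ (lt_of_lt_of_le hlt hn) (u :: U) le_rfl ?_ ?_
      · intro l hl
        rcases List.mem_cons.mp hl with rfl | hl
        · exact hul
        · exact hUlow l hl
      · intro x hx
        rcases List.mem_cons.mp hx with rfl | hx
        · exact huW
        · exact hUW x hx

-- ---- assembling the verdict ----

lemma pv_alt_eq_SP (clauses : List (List String)) :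
    simplify_cnf_alt clauses
      = SP (clauses.filter (fun clause => !pyTaut clause))
          (loopB (clauses.filter (fun clause => !pyTaut clause)) PySem.Set.empty) := by
  unfold simplify_cnf_alt SP aliveP reduceP
  dsimp only
  apply List.map_congr_left
  intro c _
  apply List.filter_congr
  intro x _
  rw [pv_contains_ofList]

-- ===== VERDICT (by name: the statement is the Claim_ definition above) =====
theorem simplify_cnf_spec : Claim_equal_simplify_cnf := by
  intro clauses _
  unfold Spec_simplify_cnf
  rw [pv_alt_eq_SP]
  unfold simplify_cnf
  conv_lhs => rw [← pv_SP_nil (clauses.filter (fun clause => !pyTaut clause))]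
  exact pv_loopA_main (clauses.filter (fun clause => !pyTaut clause))
    (SP (clauses.filter (fun clause => !pyTaut clause)) []).length [] le_rfl
    (fun l hl => absurd hl (List.not_mem_nil))
    (fun x hx => absurd hx (List.not_mem_nil))
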